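-- pv_equiv track=rewrite | github.com/Evansbee/adventofcode | aoc2019/day16.py | fft_for_digit
-- ===== SOURCE A (Python) =====
-- def fft_for_digit(i, array):
--     start = i
--     step = i + 1
--     val = 0
--
--     for outer in range(start, len(array), step * 4):
--         end = min(len(array), outer + step)
--         val += sum(array[outer:end])
--         end = min(len(array), outer + step * 3)
--         val -= sum(array[outer + step * 2 : end])
--
--     return abs(val) % 10
-- ===== SOURCE B (Python) =====
-- def fft_for_digit(i, array):
--     pattern = [0, 1, 0, -1]
--     val = 0
--     for j in range(len(array)):
--         val += array[j] * pattern[((j + 1) // (i + 1)) % 4]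
--     return abs(val) % 10
-- ===== Notes on version B (the rewrite author's own statement) =====
-- stated objective: idiomatic
-- what changed: A sums only the nonzero pattern blocks with a stride-4*(i+1) outer loop over slices; B is the textbook per-element multiply-accumulate that reads every element once and multiplies it by the derived pattern coefficient [0,1,0,-1][((j+1)//(i+1))%4].
-- outside the precondition, e.g. on fft_for_digit(-2, [5]): A returns 0, B returns 5; on fft_for_digit(-1, [5]): A raises ValueError, B raises ZeroDivisionError
import Mathlib
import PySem

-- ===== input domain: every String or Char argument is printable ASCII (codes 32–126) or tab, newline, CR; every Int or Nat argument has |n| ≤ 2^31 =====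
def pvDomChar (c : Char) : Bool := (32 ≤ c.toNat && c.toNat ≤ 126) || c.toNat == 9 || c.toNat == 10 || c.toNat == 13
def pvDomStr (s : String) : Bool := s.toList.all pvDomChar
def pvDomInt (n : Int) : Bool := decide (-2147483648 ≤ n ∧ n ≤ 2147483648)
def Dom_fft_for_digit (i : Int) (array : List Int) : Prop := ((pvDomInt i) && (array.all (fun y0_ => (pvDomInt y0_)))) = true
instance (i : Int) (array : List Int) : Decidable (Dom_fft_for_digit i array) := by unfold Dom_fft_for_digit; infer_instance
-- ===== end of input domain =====

-- B replaces A's sparse stride-4*(i+1) block-slice summation by the textbook per-element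
-- multiply-accumulate with the pattern coefficient [0,1,0,-1][((j+1)//(i+1))%4] (idiomatic, same cost).


-- ===== PORT A =====
def fft_for_digit (i : Int) (array : List Int) : Int :=
  let start := i
  let step := i + 1
  let val : Int := 0
  let val := (PySem.List.pyRange start (PySem.List.len array) (step * 4)).foldl
    (fun val outer =>
      let end1 := min (PySem.List.len array) (outer + step)
      let val := val + (PySem.List.slice array (some outer) (some end1)).sum
      let end2 := min (PySem.List.len array) (outer + step * 3)
      val - (PySem.List.slice array (some (outer + step * 2)) (some end2)).sum) val
  PySem.Int.mod |val| 10

-- ===== PORT B =====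
def fft_for_digit_alt (i : Int) (array : List Int) : Int :=
  let pattern : List Int := [0, 1, 0, -1]
  let val : Int := 0
  let val := (PySem.List.pyRange 0 (PySem.List.len array) 1).foldl
    (fun val j =>
      val + PySem.List.pyGetD array j 0 *
        PySem.List.pyGetD pattern (PySem.Int.mod (PySem.Int.floordiv (j + 1) (i + 1)) 4) 0) val
  PySem.Int.mod |val| 10

-- ===== PRECONDITION & SPEC =====
-- Pre_ excludes negative i, where A's value is an accident of range semantics (i = -1 raises
-- ValueError; i ≤ -2 yields an empty backwards range, hence 0, a value nobody would specify).
def Pre_fft_for_digit (i : Int) (array : List Int) : Prop := 0 ≤ i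
instance (i : Int) (array : List Int) : Decidable (Pre_fft_for_digit i array) := by unfold Pre_fft_for_digit; infer_instance
def pvWitness_fft_for_digit : Int × List Int := (1, [1, 2, 3, 4, 5])
def Spec_fft_for_digit (i : Int) (array : List Int) (out : Int) : Prop := out = fft_for_digit_alt i array
instance (i : Int) (array : List Int) (out : Int) : Decidable (Spec_fft_for_digit i array out) := by unfold Spec_fft_for_digit; infer_instance

-- ===== CLAIM (what is proved, stated in full; the proofs are below) =====
def Claim_equal_fft_for_digit : Prop := ∀ (i : Int) (array : List Int), Dom_fft_for_digit i array → Pre_fft_for_digit i array → Spec_fft_for_digit i array (fft_for_digit i array)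

-- ===== LEMMAS AND PROOFS =====

-- range(a, b, st) with positive step st is empty when b ≤ a
lemma pyRange_pos_nil (a b st : Int) (hst : 0 < st) (h : b ≤ a) :
    PySem.List.pyRange a b st = [] := by
  rw [PySem.List.pyRange_of_pos a b hst, if_neg (by omega)]
  simp

-- range(a, b, st) with positive step st and a < b starts with a
lemma pyRange_pos_cons (a b st : Int) (hst : 0 < st) (h : a < b) :
    PySem.List.pyRange a b st = a :: PySem.List.pyRange (a + st) b st := by
  rw [PySem.List.pyRange_of_pos a b hst, PySem.List.pyRange_of_pos (a + st) b hst, if_pos h]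
  have hne : st ≠ 0 := by omega
  have hdiv : (b - a + st - 1) / st = (b - a - 1) / st + 1 := by
    have h' : b - a + st - 1 = (b - a - 1) + 1 * st := by ring
    rw [h', Int.add_mul_ediv_right _ _ hne]
  have hnn : 0 ≤ (b - a - 1) / st := Int.ediv_nonneg (by omega) (by omega)
  by_cases h2 : a + st < b
  · rw [if_pos h2]
    have h3 : b - (a + st) + st - 1 = b - a - 1 := by ring
    rw [h3]
    have hcnt : ((b - a + st - 1) / st).toNat = ((b - a - 1) / st).toNat + 1 := by omega
    rw [hcnt, List.range_succ_eq_map, List.map_cons, List.map_map]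
    congr 1
    · simp
    · apply List.map_congr_left
      intro x _
      simp only [Function.comp_apply, Nat.succ_eq_add_one]
      push_cast
      ring
  · rw [if_neg h2]
    have hlt : b - a - 1 < st := by omega
    have h0 : (b - a - 1) / st = 0 := Int.ediv_eq_zero_of_lt (by omega) hlt
    have hcnt : ((b - a + st - 1) / st).toNat = 1 := by omega
    rw [hcnt]
    simp

-- Python (s*q + r) // s = q for 0 ≤ r < s
lemma floordiv_mul_add (s q r : Int) (hs : 0 < s) (h0 : 0 ≤ r) (h1 : r < s) :
    PySem.Int.floordiv (s * q + r) s = q := by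
  simp only [PySem.Int.floordiv]
  rw [Int.fdiv_eq_ediv, if_pos (Or.inl (by omega : (0:Int) ≤ s))]
  have h' : s * q + r = r + q * s := by ring
  rw [h', Int.add_mul_ediv_right _ _ (by omega : s ≠ 0), Int.ediv_eq_zero_of_lt h0 h1]
  ring

-- Python (4*k + t) % 4 = t for 0 ≤ t < 4
lemma fmod_four (k t : Int) (h0 : 0 ≤ t) (h1 : t < 4) :
    PySem.Int.mod (4 * k + t) 4 = t := by
  simp only [PySem.Int.mod]
  have h' : 4 * k + t = t + 4 * k := by ring
  rw [h', Int.add_mul_fmod_self_left, Int.fmod_eq_emod, if_pos (Or.inl (by omega : (0:Int) ≤ 4)),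
    Int.emod_eq_of_lt h0 h1]
  ring

-- the pattern index of j is t when j+1 lies in the t-th block of width i+1 within group k
lemma coeff_eq (i j k t : Int) (hi : 0 ≤ i) (ht0 : 0 ≤ t) (ht4 : t < 4)
    (h1 : (i + 1) * (4 * k + t) ≤ j + 1) (h2 : j + 1 < (i + 1) * (4 * k + t + 1)) :
    PySem.Int.mod (PySem.Int.floordiv (j + 1) (i + 1)) 4 = t := by
  have hs : (0 : Int) < i + 1 := by omega
  have hadd : (i + 1) * (4 * k + t + 1) = (i + 1) * (4 * k + t) + (i + 1) := by ring
  have hrep : j + 1 = (i + 1) * (4 * k + t) + (j + 1 - (i + 1) * (4 * k + t)) := by ring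
  rw [hrep, floordiv_mul_add _ _ _ hs (by omega) (by omega)]
  exact fmod_four k t ht0 ht4

-- coeff_eq with the block bounds expressed linearly in P = (i+1)*4*k (omega-friendly)
lemma coeff_eq' (i j P t : Int) (hi : 0 ≤ i) (ht0 : 0 ≤ t) (ht4 : t < 4)
    (k : Int) (hPdef : (i + 1) * 4 * k = P)
    (h1 : P + t * (i + 1) ≤ j + 1) (h2 : j + 1 < P + (t + 1) * (i + 1)) :
    PySem.Int.mod (PySem.Int.floordiv (j + 1) (i + 1)) 4 = t := by
  apply coeff_eq i j k t hi ht0 ht4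
  · rw [show (i + 1) * (4 * k + t) = P + t * (i + 1) from by rw [← hPdef]; ring]
    exact h1
  · rw [show (i + 1) * (4 * k + t + 1) = P + (t + 1) * (i + 1) from by rw [← hPdef]; ring]
    exact h2

lemma take_eq_take_min {a : Type} (l : List a) (x y : Nat)
    (h : min x l.length = min y l.length) : l.take x = l.take y := by
  apply List.ext_getElem
  · simp only [List.length_take]
    omega
  · intro n h1 h2
    simp [List.getElem_take]

lemma neg_map_sum (l : List Int) (f : Int → Int) :
    (l.map (fun j => f j * (-1))).sum = -((l.map f).sum) := by
  induction l with
  | nil => simp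
  | cons x xs ih =>
    simp only [List.map_cons, List.sum_cons, ih]
    ring

-- sum of a nonnegative slice as a sum of indexed reads over the clamped range
lemma sliceSum (array : List Int) (a b : Int) (ha : 0 ≤ a) (hb : 0 ≤ b) :
    (PySem.List.slice array (some a) (some b)).sum
      = ((PySem.List.pyRange a (min (PySem.List.len array) b)).map
          (fun j => PySem.List.pyGetD array j 0)).sum := by
  have hlen : PySem.List.len array = (array.length : Int) := PySem.List.len_eq array
  rw [PySem.List.slice_toNat array ha hb]
  by_cases hm : a ≤ min (PySem.List.len array) b
  · have hsplit := PySem.List.pyRange_one_append a (min (PySem.List.len array) b)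
      (PySem.List.len array) hm (min_le_left _ _)
    have htake : PySem.List.pyRange a (min (PySem.List.len array) b)
        = (PySem.List.pyRange a (PySem.List.len array)).take
            ((min (PySem.List.len array) b - a).toNat) := by
      rw [hsplit]
      exact (List.take_left' (by rw [PySem.List.length_pyRange_one])).symm
    rw [htake, List.map_take, PySem.List.map_pyGetD_pyRange array 0 ha]
    congr 1
    apply take_eq_take_min
    simp only [List.length_drop]
    omega
  · rw [not_le] at hm
    rw [PySem.List.pyRange_one_eq_nil (le_of_lt hm)]
    simp only [List.map_nil, List.sum_nil]
    rcases min_lt_iff.1 hm with h | h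
    · have hd : array.length ≤ a.toNat := by omega
      rw [List.drop_eq_nil_of_le hd]
      simp
    · have ht : b.toNat - a.toNat = 0 := by omega
      rw [ht]
      simp

lemma zero_sum (l : List Int) (g : Int → Int) (h : ∀ j ∈ l, g j = 0) : (l.map g).sum = 0 := by
  apply List.sum_eq_zero
  intro x hx
  obtain ⟨j, hj, rfl⟩ := List.mem_map.1 hx
  exact h j hj

set_option maxHeartbeats 800000 in
-- one iteration of A's loop equals the coefficient sum over its 4*(i+1)-wide window
lemma block_eq (i k : Int) (array : List Int) (hi : 0 ≤ i) (hk : 0 ≤ k)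
    (hout : (i + 1) * 4 * k + i < PySem.List.len array) :
    (PySem.List.slice array (some ((i + 1) * 4 * k + i))
        (some (min (PySem.List.len array) ((i + 1) * 4 * k + i + (i + 1))))).sum
      - (PySem.List.slice array (some ((i + 1) * 4 * k + i + (i + 1) * 2))
        (some (min (PySem.List.len array) ((i + 1) * 4 * k + i + (i + 1) * 3)))).sum
      = ((PySem.List.pyRange ((i + 1) * 4 * k) (min (PySem.List.len array) ((i + 1) * 4 * (k + 1)))).map
          (fun j => PySem.List.pyGetD array j 0 *
            PySem.List.pyGetD [0, 1, 0, -1]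
              (PySem.Int.mod (PySem.Int.floordiv (j + 1) (i + 1)) 4) 0)).sum := by
  revert hout
  generalize hPdef : (i + 1) * 4 * k = P
  generalize hn : PySem.List.len array = n
  intro hout
  have hlen : n = (array.length : Int) := hn.symm.trans (PySem.List.len_eq array)
  have hnn : (0 : Int) ≤ n := by rw [hlen]; positivity
  have hP : 0 ≤ P := hPdef ▸ mul_nonneg (by omega) hk
  rw [show (i + 1) * 4 * (k + 1) = P + (4 * i + 4) from by rw [← hPdef]; ring,
    show P + i + (i + 1) = P + 2 * i + 1 from by ring,
    show P + i + (i + 1) * 2 = P + 3 * i + 2 from by ring,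
    show P + i + (i + 1) * 3 = P + 4 * i + 3 from by ring]
  have hs1 := PySem.List.pyRange_one_append P (P + i) (min n (P + (4 * i + 4)))
    (by omega) (by omega)
  have hs2 := PySem.List.pyRange_one_append (P + i) (min n (P + 2 * i + 1))
    (min n (P + (4 * i + 4))) (by omega) (by omega)
  have hs3 := PySem.List.pyRange_one_append (min n (P + 2 * i + 1)) (min n (P + 3 * i + 2))
    (min n (P + (4 * i + 4))) (by omega) (by omega)
  have hs4 := PySem.List.pyRange_one_append (min n (P + 3 * i + 2)) (min n (P + 4 * i + 3))
    (min n (P + (4 * i + 4))) (by omega) (by omega)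
  rw [hs1, hs2, hs3, hs4]
  simp only [List.map_append, List.sum_append]
  have hpat0 : PySem.List.pyGetD [(0:Int), 1, 0, -1] 0 0 = 0 := by decide
  have hpat1 : PySem.List.pyGetD [(0:Int), 1, 0, -1] 1 0 = 1 := by decide
  have hpat2 : PySem.List.pyGetD [(0:Int), 1, 0, -1] 2 0 = 0 := by decide
  have hpat3 : PySem.List.pyGetD [(0:Int), 1, 0, -1] 3 0 = -1 := by decide
  have hz0 : ((PySem.List.pyRange P (P + i)).map
      (fun j => PySem.List.pyGetD array j 0 * PySem.List.pyGetD [0, 1, 0, -1]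
        (PySem.Int.mod (PySem.Int.floordiv (j + 1) (i + 1)) 4) 0)).sum = 0 := by
    apply zero_sum
    intro j hj
    rw [PySem.List.mem_pyRange_one] at hj
    rw [coeff_eq' i j P 0 hi (by norm_num) (by norm_num) k hPdef (by omega) (by omega),
      hpat0, mul_zero]
  have hpos : ((PySem.List.pyRange (P + i) (min n (P + 2 * i + 1))).map
      (fun j => PySem.List.pyGetD array j 0 * PySem.List.pyGetD [0, 1, 0, -1]
        (PySem.Int.mod (PySem.Int.floordiv (j + 1) (i + 1)) 4) 0)).sum
      = ((PySem.List.pyRange (P + i) (min n (P + 2 * i + 1))).map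
          (fun j => PySem.List.pyGetD array j 0)).sum := by
    refine congrArg List.sum (List.map_congr_left ?_)
    intro j hj
    rw [PySem.List.mem_pyRange_one] at hj
    rw [coeff_eq' i j P 1 hi (by norm_num) (by norm_num) k hPdef (by omega) (by omega),
      hpat1, mul_one]
  have hz2 : ((PySem.List.pyRange (min n (P + 2 * i + 1)) (min n (P + 3 * i + 2))).map
      (fun j => PySem.List.pyGetD array j 0 * PySem.List.pyGetD [0, 1, 0, -1]
        (PySem.Int.mod (PySem.Int.floordiv (j + 1) (i + 1)) 4) 0)).sum = 0 := by
    clear hz0 hpos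
    apply zero_sum
    intro j hj
    rw [PySem.List.mem_pyRange_one] at hj
    by_cases hc2 : P + 2 * i + 1 ≤ n
    · rw [coeff_eq' i j P 2 hi (by norm_num) (by norm_num) k hPdef (by omega) (by omega),
        hpat2, mul_zero]
    · exfalso; omega
  have hneg : ((PySem.List.pyRange (min n (P + 3 * i + 2)) (min n (P + 4 * i + 3))).map
      (fun j => PySem.List.pyGetD array j 0 * PySem.List.pyGetD [0, 1, 0, -1]
        (PySem.Int.mod (PySem.Int.floordiv (j + 1) (i + 1)) 4) 0)).sum
      = -(PySem.List.slice array (some (P + 3 * i + 2)) (some (min n (P + 4 * i + 3)))).sum := by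
    clear hz0 hpos hz2
    by_cases hc3 : P + 3 * i + 2 ≤ n
    · rw [show min n (P + 3 * i + 2) = P + 3 * i + 2 from by omega]
      have hmap : ((PySem.List.pyRange (P + 3 * i + 2) (min n (P + 4 * i + 3))).map
          (fun j => PySem.List.pyGetD array j 0 * PySem.List.pyGetD [0, 1, 0, -1]
            (PySem.Int.mod (PySem.Int.floordiv (j + 1) (i + 1)) 4) 0))
          = ((PySem.List.pyRange (P + 3 * i + 2) (min n (P + 4 * i + 3))).map
              (fun j => PySem.List.pyGetD array j 0 * (-1))) := by
        apply List.map_congr_left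
        intro j hj
        rw [PySem.List.mem_pyRange_one] at hj
        rw [coeff_eq' i j P 3 hi (by norm_num) (by norm_num) k hPdef (by omega) (by omega),
          hpat3]
      rw [hmap, neg_map_sum]
      have hS2 := sliceSum array (P + 3 * i + 2) (min n (P + 4 * i + 3)) (by omega) (by omega)
      rw [hn] at hS2
      rw [show min n (min n (P + 4 * i + 3)) = min n (P + 4 * i + 3) from by omega] at hS2
      rw [hS2]
    · rw [show min n (P + 3 * i + 2) = n from by omega,
        show min n (P + 4 * i + 3) = n from by omega,
        PySem.List.pyRange_one_eq_nil le_rfl]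
      simp only [List.map_nil, List.sum_nil]
      rw [PySem.List.slice_toNat array (by omega) (by omega)]
      have hd : array.length ≤ (P + 3 * i + 2).toNat := by omega
      rw [List.drop_eq_nil_of_le hd]
      simp
  have hz4 : ((PySem.List.pyRange (min n (P + 4 * i + 3)) (min n (P + (4 * i + 4)))).map
      (fun j => PySem.List.pyGetD array j 0 * PySem.List.pyGetD [0, 1, 0, -1]
        (PySem.Int.mod (PySem.Int.floordiv (j + 1) (i + 1)) 4) 0)).sum = 0 := by
    clear hz0 hpos hz2 hneg
    apply zero_sum
    intro j hj
    rw [PySem.List.mem_pyRange_one] at hj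
    by_cases hc4 : P + 4 * i + 3 ≤ n
    · rw [coeff_eq' i j (P + (4 * i + 4)) 0 hi (by norm_num) (by norm_num) (k + 1)
        (by rw [← hPdef]; ring) (by omega) (by omega), hpat0, mul_zero]
    · exfalso; omega
  rw [hz0, hpos, hz2, hneg, hz4]
  have hS1 := sliceSum array (P + i) (min n (P + 2 * i + 1)) (by omega) (by omega)
  rw [hn] at hS1
  rw [show min n (min n (P + 2 * i + 1)) = min n (P + 2 * i + 1) from by omega] at hS1
  rw [hS1]
  ring

-- A's whole loop from block k onward equals B's coefficient sum from index 4*(i+1)*k onward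
lemma main_loop (i : Int) (array : List Int) (hi : 0 ≤ i) : ∀ (m : Nat) (k : Int), 0 ≤ k →
    (PySem.List.len array - (i + 1) * 4 * k).toNat ≤ m →
    ((PySem.List.pyRange ((i + 1) * 4 * k + i) (PySem.List.len array) ((i + 1) * 4)).map
        (fun outer =>
          (PySem.List.slice array (some outer)
              (some (min (PySem.List.len array) (outer + (i + 1))))).sum
            - (PySem.List.slice array (some (outer + (i + 1) * 2))
              (some (min (PySem.List.len array) (outer + (i + 1) * 3)))).sum)).sum
      = ((PySem.List.pyRange ((i + 1) * 4 * k) (PySem.List.len array)).map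
          (fun j => PySem.List.pyGetD array j 0 *
            PySem.List.pyGetD [0, 1, 0, -1]
              (PySem.Int.mod (PySem.Int.floordiv (j + 1) (i + 1)) 4) 0)).sum := by
  have hlen : PySem.List.len array = (array.length : Int) := PySem.List.len_eq array
  have hnn : (0 : Int) ≤ PySem.List.len array := by rw [hlen]; positivity
  intro m
  induction m with
  | zero =>
    intro k hk hle
    have hP : 0 ≤ (i + 1) * 4 * k := mul_nonneg (by omega) hk
    rw [pyRange_pos_nil _ _ _ (by omega) (by omega),
      PySem.List.pyRange_one_eq_nil (by omega)]
    simp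
  | succ m ih =>
    intro k hk hle
    have hP : 0 ≤ (i + 1) * 4 * k := mul_nonneg (by omega) hk
    have hB : (i + 1) * 4 * (k + 1) = (i + 1) * 4 * k + (4 * i + 4) := by ring
    by_cases hlt : (i + 1) * 4 * k + i < PySem.List.len array
    · rw [pyRange_pos_cons _ _ _ (by omega) hlt]
      simp only [List.map_cons, List.sum_cons]
      have hsh : (i + 1) * 4 * k + i + (i + 1) * 4 = (i + 1) * 4 * (k + 1) + i := by ring
      rw [hsh, ih (k + 1) (by omega) (by omega)]
      have hsplit := PySem.List.pyRange_one_append ((i + 1) * 4 * k)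
        (min (PySem.List.len array) ((i + 1) * 4 * (k + 1))) (PySem.List.len array)
        (by omega) (by omega)
      rw [hsplit, List.map_append, List.sum_append]
      have htail : PySem.List.pyRange (min (PySem.List.len array) ((i + 1) * 4 * (k + 1)))
          (PySem.List.len array)
          = PySem.List.pyRange ((i + 1) * 4 * (k + 1)) (PySem.List.len array) := by
        by_cases hc : (i + 1) * 4 * (k + 1) ≤ PySem.List.len array
        · have h1 : min (PySem.List.len array) ((i + 1) * 4 * (k + 1))
              = (i + 1) * 4 * (k + 1) := by omega
          rw [h1]
        · have h1 : min (PySem.List.len array) ((i + 1) * 4 * (k + 1))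
              = PySem.List.len array := by omega
          rw [h1, PySem.List.pyRange_one_eq_nil le_rfl, PySem.List.pyRange_one_eq_nil (by omega)]
      rw [htail, block_eq i k array hi hk hlt]
    · rw [pyRange_pos_nil _ _ _ (by omega) (by omega)]
      simp only [List.map_nil, List.sum_nil]
      symm
      apply zero_sum
      intro j hj
      rw [PySem.List.mem_pyRange_one] at hj
      have e0 : (i + 1) * (4 * k + 0) = (i + 1) * 4 * k := by ring
      have e1 : (i + 1) * (4 * k + 0 + 1) = (i + 1) * 4 * k + (i + 1) := by ring
      rw [coeff_eq i j k 0 hi (by norm_num) (by norm_num) (by rw [e0]; omega) (by rw [e1]; omega)]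
      have hpat0 : PySem.List.pyGetD [(0:Int), 1, 0, -1] 0 0 = 0 := by decide
      rw [hpat0, mul_zero]

-- ===== VERDICT (by name: the statement is the Claim_ definition above) =====
theorem fft_for_digit_spec : Claim_equal_fft_for_digit := by
  intro i array _ hpre
  have hi : (0 : Int) ≤ i := hpre
  unfold Spec_fft_for_digit
  simp only [fft_for_digit, fft_for_digit_alt]
  have hb : (fun (val outer : Int) => val
        + (PySem.List.slice array (some outer)
            (some (min (PySem.List.len array) (outer + (i + 1))))).sum
        - (PySem.List.slice array (some (outer + (i + 1) * 2))
            (some (min (PySem.List.len array) (outer + (i + 1) * 3)))).sum)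
      = (fun (val outer : Int) => val
        + ((PySem.List.slice array (some outer)
            (some (min (PySem.List.len array) (outer + (i + 1))))).sum
          - (PySem.List.slice array (some (outer + (i + 1) * 2))
            (some (min (PySem.List.len array) (outer + (i + 1) * 3)))).sum)) := by
    funext v o
    ring
  rw [hb, PySem.List.foldl_add, PySem.List.foldl_add]
  have hz : (i + 1) * 4 * 0 = 0 := by ring
  have hmain := main_loop i array hi (PySem.List.len array).toNat 0 le_rfl (by rw [hz]; omega)
  rw [hz, zero_add] at hmain
  rw [hmain]
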